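-- pv_equiv track=rewrite | github.com/lacker/seticore | viewer.py | interpolate_drift
-- ===== SOURCE A (Python) =====
-- def round_up_power_of_two(n):
--     assert n >= 1
--     answer = 1
--     while answer < n:
--         answer *= 2
--     return answer
--
-- def interpolate_drift(total_drift, timesteps):
--     """Returns a list of drifts, one for each timestep, to get to a total of total_drift.
--     Must start with 0 and end with total_drift.
--     """
--     rounded_up = round_up_power_of_two(timesteps)
--     if rounded_up > timesteps:
--         return interpolate_drift(total_drift, rounded_up)[:timesteps]
--
--     assert("{0:b}".format(timesteps).count("1") == 1)
--     if timesteps == 2: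
--         return [0, total_drift]
--     assert timesteps > 2
--     assert timesteps % 2 == 0
--
--     if total_drift < 0:
--         return [-x for x in interpolate_drift(-total_drift, timesteps)]
--
--     shift = total_drift // (timesteps - 1)
--     if shift > 0:
--         post_shift_drift = total_drift % (timesteps - 1)
--         post_shift_interpolate = interpolate_drift(post_shift_drift, timesteps)
--         return [i * shift + x for (i, x) in enumerate(post_shift_interpolate)]
--
--     parity = total_drift % 2
--     half_drift = total_drift // 2
--     assert half_drift * 2 + parity == total_drift
--     half_interpolate = interpolate_drift(half_drift, timesteps // 2)
--     second_half_start = half_interpolate[-1] + parity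
--     return half_interpolate + [x + second_half_start for x in half_interpolate]
-- ===== SOURCE B (Python) =====
-- def interpolate_drift(total_drift, timesteps):
--     """Returns a list of drifts, one for each timestep, to get to a total of total_drift.
--     Per-index computation: each index walks down the halving levels instead of
--     building the list by recursive concatenation."""
--     m = 1
--     while m < timesteps:
--         m *= 2
--     sign = -1 if total_drift < 0 else 1
--     d0 = abs(total_drift)
--     out = []
--     for i in range(timesteps):
--         local, d, s, acc = i, d0, m, 0
--         while s > 2:
--             if d >= s - 1:
--                 acc += local * (d // (s - 1))
--                 d %= s - 1
--             half = s // 2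
--             if local >= half:
--                 acc += d // 2 + d % 2
--                 local -= half
--             d //= 2
--             s = half
--         acc += local * d
--         out.append(sign * acc)
--     return out
-- ===== Notes on version B (the rewrite author's own statement) =====
-- stated objective: alternative
-- what changed: A builds the list by recursive halving/concatenation (with shift-reduction and negation recursions); B computes each timestep independently by walking that index down the halving levels with an accumulator, so no intermediate lists are built.
import Mathlib
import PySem

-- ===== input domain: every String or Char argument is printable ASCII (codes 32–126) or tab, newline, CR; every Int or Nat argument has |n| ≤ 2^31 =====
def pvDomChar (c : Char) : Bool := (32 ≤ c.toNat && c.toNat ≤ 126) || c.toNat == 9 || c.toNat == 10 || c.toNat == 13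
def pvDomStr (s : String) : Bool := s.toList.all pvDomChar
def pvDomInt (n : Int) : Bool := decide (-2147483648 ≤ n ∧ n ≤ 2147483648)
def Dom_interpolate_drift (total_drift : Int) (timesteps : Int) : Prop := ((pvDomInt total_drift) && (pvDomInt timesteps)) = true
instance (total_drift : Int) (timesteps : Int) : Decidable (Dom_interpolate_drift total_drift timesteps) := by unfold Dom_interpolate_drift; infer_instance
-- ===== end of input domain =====

-- B replaces A's recursive list concatenation by an independent per-index walk down the halving levels (alternative decomposition, same result).

-- ===== PORT A =====
-- while answer < n: answer *= 2   (the '0 < a' conjunct only makes the recursion total; Python always calls with answer ≥ 1)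
def ruGo (n a : Int) : Int :=
  if h : a < n ∧ 0 < a then ruGo n (2 * a) else a
termination_by (n - a).toNat
decreasing_by omega

-- facts about the loop the port's own termination proof cites
lemma ruGo_spec : ∀ (μ : ℕ) (n a : Int), (n - a).toNat = μ → 0 < a →
    (a ≤ ruGo n a ∧ n ≤ ruGo n a ∧ ∃ j : ℕ, ruGo n a = a * 2 ^ j) := by
  intro μ
  induction μ using Nat.strong_induction_on with
  | _ μ ih =>
    intro n a hμ ha
    rw [ruGo]
    split
    · rename_i h
      have hlt : (n - 2 * a).toNat < μ := by omega
      obtain ⟨h1, h2, j, h3⟩ := ih _ hlt n (2 * a) rfl (by omega)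
      exact ⟨by omega, h2, j + 1, by rw [h3]; ring⟩
    · rename_i h
      exact ⟨le_refl a, by omega, 0, by ring⟩

def round_up_power_of_two (n : Int) : Int := ruGo n 1

lemma ru_ge (n : Int) : n ≤ round_up_power_of_two n :=
  (ruGo_spec _ n 1 rfl (by omega)).2.1

lemma ru_pow (n : Int) : ∃ j : ℕ, round_up_power_of_two n = 2 ^ j := by
  obtain ⟨j, hj⟩ := (ruGo_spec _ n 1 rfl (by omega)).2.2
  exact ⟨j, by rw [round_up_power_of_two, hj]; ring⟩

lemma ruGo_two_pow : ∀ (δ k j : ℕ), k - j = δ → j ≤ k → ruGo ((2:Int) ^ k) ((2:Int) ^ j) = 2 ^ k := by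
  intro δ
  induction δ with
  | zero =>
    intro k j h1 h2
    have : j = k := by omega
    subst this
    rw [ruGo]
    simp
  | succ δ ih =>
    intro k j h1 h2
    have hjk : j < k := by omega
    rw [ruGo]
    have hlt : (2:Int) ^ j < 2 ^ k := by
      exact_mod_cast Nat.pow_lt_pow_right (by omega) hjk
    rw [dif_pos ⟨hlt, by positivity⟩]
    have : (2:Int) * 2 ^ j = 2 ^ (j + 1) := by ring
    rw [this, ih k (j+1) (by omega) (by omega)]

lemma ru_two_pow (k : ℕ) : round_up_power_of_two ((2:Int) ^ k) = 2 ^ k := by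
  have := ruGo_two_pow k k 0 (by omega) (by omega)
  simpa [round_up_power_of_two] using this

def interpolate_drift (total_drift : Int) (timesteps : Int) : List Int :=
  let rounded := round_up_power_of_two timesteps
  if h1 : rounded > timesteps then
    PySem.List.slice (interpolate_drift total_drift rounded) none (some timesteps)
  else if PySem.Int.bitCount timesteps = 1 then
    if timesteps = 2 then [0, total_drift]
    else if h2 : 2 < timesteps then
      if PySem.Int.mod timesteps 2 = 0 then
        if h4 : total_drift < 0 then
          (interpolate_drift (-total_drift) timesteps).map (fun x => -x)
        else
          let shift := PySem.Int.floordiv total_drift (timesteps - 1)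
          if h5 : shift > 0 then
            let post_shift_drift := PySem.Int.mod total_drift (timesteps - 1)
            (PySem.List.enumerate (interpolate_drift post_shift_drift timesteps)).map
              (fun p => p.1 * shift + p.2)
          else
            let parity := PySem.Int.mod total_drift 2
            let half_drift := PySem.Int.floordiv total_drift 2
            if half_drift * 2 + parity = total_drift then
              let half_interpolate := interpolate_drift half_drift (PySem.Int.floordiv timesteps 2)
              match PySem.List.pyGet? half_interpolate (-1) with
              | none => []                              -- IndexError: junk value
              | some last => half_interpolate ++ half_interpolate.map (fun x => x + (last + parity))
            else []                                     -- assert fails: junk value for the raise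
      else []                                           -- assert timesteps % 2 == 0 fails: junk value
    else []                                             -- assert timesteps > 2 fails: junk value
  else []                                               -- assert on the binary representation fails: junk value
termination_by ((2 * round_up_power_of_two timesteps - timesteps).toNat,
  (if total_drift < 0 then 1 else 0), total_drift.natAbs)
decreasing_by
  · -- call on (total_drift, rounded)
    apply Prod.Lex.left
    have hge := ru_ge timesteps
    obtain ⟨j, hj⟩ := ru_pow timesteps
    have hp : (0:Int) < 2 ^ j := by positivity
    simp only [hj, ru_two_pow]
    omega
  · -- negation call
    apply Prod.Lex.right
    apply Prod.Lex.left
    rw [if_neg (by omega), if_pos h4]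
    omega
  · -- shift call
    have hpos : (0:Int) < timesteps - 1 := by omega
    have hm0 := PySem.Int.mod_nonneg total_drift hpos
    have hm1 := PySem.Int.mod_lt total_drift hpos
    apply Prod.Lex.right
    rw [if_neg (by omega), if_neg h4]
    apply Prod.Lex.right
    have hge : 1 * (timesteps - 1) ≤ total_drift := (PySem.Int.le_floordiv_iff_mul_le hpos).mp h5
    omega
  · -- halving call
    apply Prod.Lex.left
    have hge := ru_ge timesteps
    obtain ⟨j, hj⟩ := ru_pow timesteps
    have hp : (0:Int) < 2 ^ j := by positivity
    have hts : timesteps = 2 ^ j := by omega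
    have hj2 : 2 ≤ j := by
      by_contra hc
      have : j = 0 ∨ j = 1 := by omega
      rcases this with h | h <;> simp [h] at hts <;> omega
    have hhalf : PySem.Int.floordiv timesteps 2 = 2 ^ (j - 1) := by
      rw [PySem.Int.floordiv_eq_ediv_of_pos (by omega), hts]
      have : (2:Int) ^ j = 2 ^ (j - 1) * 2 := by
        rw [← pow_succ]; congr 1; omega
      rw [this]
      simp
    rw [hhalf, ru_two_pow]
    have hq : (0:Int) < 2 ^ (j-1) := by positivity
    have h2lt : (2:Int) ^ (j-1) < 2 ^ j := by
      exact_mod_cast Nat.pow_lt_pow_right (by omega) (by omega)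
    omega

-- ===== PORT B =====
-- m = 1; while m < timesteps: m *= 2   (the '0 < m' conjunct only makes the recursion total)
def altRu (t m : Int) : Int :=
  if h : m < t ∧ 0 < m then altRu t (2 * m) else m
termination_by (t - m).toNat
decreasing_by omega

-- inner 'while s > 2' walk of one index down the halving levels
def altGo (loc d s acc : Int) : Int :=
  if h : 2 < s then
    let acc1 := if s - 1 ≤ d then acc + loc * PySem.Int.floordiv d (s - 1) else acc
    let d1 := if s - 1 ≤ d then PySem.Int.mod d (s - 1) else d
    let half := PySem.Int.floordiv s 2
    let acc2 := if half ≤ loc then acc1 + PySem.Int.floordiv d1 2 + PySem.Int.mod d1 2 else acc1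
    let loc2 := if half ≤ loc then loc - half else loc
    altGo loc2 (PySem.Int.floordiv d1 2) half acc2
  else acc + loc * d
termination_by s.toNat
decreasing_by
  rw [PySem.Int.floordiv_eq_ediv_of_pos (by omega)]
  omega

def interpolate_drift_alt (total_drift : Int) (timesteps : Int) : List Int :=
  let m := altRu timesteps 1
  let sign : Int := if total_drift < 0 then -1 else 1
  let d0 := |total_drift|
  (List.range timesteps.toNat).map (fun (i : ℕ) => sign * altGo (i : Int) d0 m 0)

-- ===== PRECONDITION & SPEC =====
-- Python A raises (AssertionError for timesteps ≤ 1, via round_up_power_of_two's assert for timesteps < 1) unless timesteps ≥ 2.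
def Pre_interpolate_drift (total_drift : Int) (timesteps : Int) : Prop := 2 ≤ timesteps
instance (total_drift : Int) (timesteps : Int) : Decidable (Pre_interpolate_drift total_drift timesteps) := by unfold Pre_interpolate_drift; infer_instance
def pvWitness_interpolate_drift : Int × Int := (13, 6)

def Spec_interpolate_drift (total_drift : Int) (timesteps : Int) (out : List Int) : Prop := out = interpolate_drift_alt total_drift timesteps
instance (total_drift : Int) (timesteps : Int) (out : List Int) : Decidable (Spec_interpolate_drift total_drift timesteps out) := by unfold Spec_interpolate_drift; infer_instance

-- ===== CLAIM (what is proved, stated in full; the proofs are below) =====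
def Claim_equal_interpolate_drift : Prop := ∀ (total_drift : Int) (timesteps : Int), Dom_interpolate_drift total_drift timesteps → Pre_interpolate_drift total_drift timesteps → Spec_interpolate_drift total_drift timesteps (interpolate_drift total_drift timesteps)

-- ===== LEMMAS AND PROOFS =====

-- the accumulator is additive
lemma altGo_acc : ∀ (μ : ℕ) (loc d s acc : Int), s.toNat = μ →
    altGo loc d s acc = acc + altGo loc d s 0 := by
  intro μ
  induction μ using Nat.strong_induction_on with
  | _ μ ih =>
    intro loc d s acc hμ
    by_cases h : 2 < s
    · conv_lhs => rw [altGo]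
      conv_rhs => rw [altGo]
      rw [dif_pos h, dif_pos h]
      dsimp only
      have hhalf : (PySem.Int.floordiv s 2).toNat < μ := by
        rw [PySem.Int.floordiv_eq_ediv_of_pos (by omega : (0:Int) < 2)]
        omega
      have hkey : ∀ (l d' a' b' c' : Int), a' = c' + b' →
          altGo l d' (PySem.Int.floordiv s 2) a' = c' + altGo l d' (PySem.Int.floordiv s 2) b' := by
        intro l d' a' b' c' he
        rw [ih _ hhalf l d' (PySem.Int.floordiv s 2) a' rfl,
            ih _ hhalf l d' (PySem.Int.floordiv s 2) b' rfl]
        omega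
      split_ifs <;> exact hkey _ _ _ _ _ (by ring)
    · conv_lhs => rw [altGo]
      conv_rhs => rw [altGo]
      rw [dif_neg h, dif_neg h]
      ring

lemma altGo_acc' (loc d s acc : Int) : altGo loc d s acc = acc + altGo loc d s 0 :=
  altGo_acc s.toNat loc d s acc rfl

lemma altGo_congr_acc (l d s a b c : Int) (h : a = c + b) :
    altGo l d s a = c + altGo l d s b := by
  rw [altGo_acc' l d s a, altGo_acc' l d s b]
  omega

-- one shift-reduction step (matches A's shift>0 recursion)
lemma altGo_shift (loc d s acc : Int) (h2 : 2 < s) (hd : s - 1 ≤ d) :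
    altGo loc d s acc = loc * PySem.Int.floordiv d (s - 1) + altGo loc (PySem.Int.mod d (s - 1)) s acc := by
  have hpos : (0:Int) < s - 1 := by omega
  have hm1 := PySem.Int.mod_lt d hpos
  conv_lhs => rw [altGo]
  conv_rhs => rw [altGo]
  rw [dif_pos h2, dif_pos h2]
  dsimp only
  rw [if_pos hd, if_neg (by omega : ¬ (s - 1 ≤ PySem.Int.mod d (s - 1)))]
  split_ifs <;> first
    | (exfalso; omega)
    | exact altGo_congr_acc _ _ _ _ _ _ (by ring)

lemma fd_two_pow (k : ℕ) (hk : 1 ≤ k) : PySem.Int.floordiv ((2:Int) ^ k) 2 = 2 ^ (k - 1) := by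
  rw [PySem.Int.floordiv_eq_ediv_of_pos (by omega : (0:Int) < 2)]
  have h : (2:Int) ^ k = 2 ^ (k - 1) * 2 := by rw [← pow_succ]; congr 1; omega
  rw [h]
  simp

-- the last index recovers the whole drift
lemma altGo_last : ∀ (k : ℕ), 1 ≤ k → ∀ d : Int, 0 ≤ d →
    altGo ((2:Int) ^ k - 1) d ((2:Int) ^ k) 0 = d := by
  intro k
  induction k with
  | zero => omega
  | succ k ihk =>
    intro _
    by_cases hk1 : k = 0
    · subst hk1
      intro d hd
      conv_lhs => rw [altGo]
      rw [dif_neg (by norm_num)]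
      ring
    · have hk : 1 ≤ k := by omega
      have hp : (0:Int) < 2 ^ k := by positivity
      have hs2 : (2:Int) ^ (k+1) = 2 * 2 ^ k := by rw [pow_succ]; ring
      have hs : (2:Int) < 2 ^ (k+1) := by
        have h1 : (2:Int) ^ 1 < 2 ^ (k+1) := pow_lt_pow_right₀ (by norm_num) (by omega)
        simpa using h1
      have key : ∀ e : Int, 0 ≤ e → e < 2 ^ (k+1) - 1 →
          altGo ((2:Int) ^ (k+1) - 1) e ((2:Int) ^ (k+1)) 0 = e := by
        intro e he hlt
        conv_lhs => rw [altGo]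
        rw [dif_pos hs]
        dsimp only
        rw [if_neg (show ¬ ((2:Int) ^ (k+1) - 1 ≤ e) by omega),
            if_neg (show ¬ ((2:Int) ^ (k+1) - 1 ≤ e) by omega),
            fd_two_pow (k+1) (by omega)]
        simp only [Nat.add_sub_cancel]
        rw [if_pos (show (2:Int) ^ k ≤ 2 ^ (k+1) - 1 by omega),
            if_pos (show (2:Int) ^ k ≤ 2 ^ (k+1) - 1 by omega)]
        rw [show (2:Int) ^ (k+1) - 1 - 2 ^ k = 2 ^ k - 1 from by rw [hs2]; ring]
        rw [altGo_acc' ((2:Int) ^ k - 1) (PySem.Int.floordiv e 2) ((2:Int) ^ k)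
              (0 + PySem.Int.floordiv e 2 + PySem.Int.mod e 2)]
        rw [ihk hk (PySem.Int.floordiv e 2)
              (by rw [PySem.Int.floordiv_eq_ediv_of_pos (by omega : (0:Int) < 2)]; omega)]
        have := PySem.Int.floordiv_mul_add_mod e 2
        omega
      intro d hd
      by_cases hge : (2:Int) ^ (k+1) - 1 ≤ d
      · rw [altGo_shift _ _ _ _ hs hge]
        have hpos : (0:Int) < 2 ^ (k+1) - 1 := by omega
        rw [key (PySem.Int.mod d ((2:Int) ^ (k+1) - 1)) (PySem.Int.mod_nonneg d hpos)
              (PySem.Int.mod_lt d hpos)]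
        have := PySem.Int.floordiv_mul_add_mod d ((2:Int) ^ (k+1) - 1)
        linarith
      · exact key d hd (by omega)

lemma bitCount_two_pow : ∀ k : ℕ, PySem.Int.bitCount ((2:Int) ^ k) = 1 := by
  intro k
  induction k with
  | zero => decide
  | succ k ihk =>
    have hcast : ((2:Int)) ^ (k+1) = ((2 ^ (k+1) : ℕ) : Int) := by push_cast; ring
    have hps : (2:ℕ) ^ (k+1) = 2 ^ k * 2 := pow_succ 2 k
    have h1 : (2:ℕ) ^ (k+1) % 2 = 0 := by omega
    have h2 : (2:ℕ) ^ (k+1) / 2 = 2 ^ k := by omega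
    rw [hcast, PySem.Int.bitCount_natCast (by positivity), h1, h2]
    have hcast2 : (((2:ℕ) ^ k : ℕ) : Int) = (2:Int) ^ k := by push_cast; ring
    rw [hcast2, ihk]

lemma enum_map (g : ℕ → Int) (F : Int → Int → Int) : ∀ (M a : ℕ),
    (PySem.List.enumerate ((List.range' a M).map g) (a : Int)).map (fun p => F p.1 p.2)
      = (List.range' a M).map (fun (i : ℕ) => F (i : Int) (g i)) := by
  intro M
  induction M with
  | zero => intro a; simp
  | succ M ihM =>
    intro a
    rw [List.range'_succ]
    simp only [List.map_cons, PySem.List.enumerate_cons]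
    rw [show ((a:Int) + 1) = ((a + 1 : ℕ) : Int) from by push_cast; ring, ihM (a+1)]

lemma enum_map_range (g : ℕ → Int) (c : Int) (M : ℕ) :
    (PySem.List.enumerate ((List.range M).map g)).map (fun p => p.1 * c + p.2)
      = (List.range M).map (fun (i : ℕ) => (i : Int) * c + g i) := by
  have h := enum_map g (fun x y => x * c + y) M 0
  simpa [List.range_eq_range'] using h

lemma altGo_two (l d : Int) : altGo l d 2 0 = l * d := by
  conv_lhs => rw [altGo]
  rw [dif_neg (by norm_num)]
  ring

lemma main_base (d : Int) : interpolate_drift d 2 = [0, d] := by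
  have hru : round_up_power_of_two 2 = 2 := by
    have h := ru_two_pow 1
    norm_num at h
    exact h
  rw [interpolate_drift]
  dsimp only
  rw [dif_neg (by rw [hru]; omega), if_pos (by decide : PySem.Int.bitCount 2 = 1), if_pos rfl]

-- A on a power-of-two number of timesteps, nonnegative drift, equals the per-index walk
lemma main_nonneg : ∀ (μ : ℕ) (k : ℕ) (d : Int), 2 ^ k + d.toNat = μ → 1 ≤ k → 0 ≤ d →
    interpolate_drift d ((2:Int) ^ k) =
      (List.range (2 ^ k)).map (fun (i : ℕ) => altGo (i : Int) d ((2:Int) ^ k) 0) := by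
  intro μ
  induction μ using Nat.strong_induction_on with
  | _ μ ih =>
    intro k d hμ hk hd
    have hru : round_up_power_of_two ((2:Int) ^ k) = 2 ^ k := ru_two_pow k
    by_cases hk1 : k = 1
    · subst hk1
      norm_num
      rw [main_base]
      norm_num [List.range_succ, altGo_two]
    · have hk2 : 2 ≤ k := by omega
      have hpn : (0:ℕ) < 2 ^ (k-1) := by positivity
      have hpn2 : (2:ℕ) ^ k = 2 ^ (k-1) * 2 := by rw [← pow_succ]; congr 1; omega
      have hp : (0:Int) < 2 ^ (k-1) := by positivity
      have hs2 : (2:Int) ^ k = 2 ^ (k-1) * 2 := by rw [← pow_succ]; congr 1; omega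
      have hgt2 : (2:Int) < 2 ^ k := by
        have h1 : (2:Int) ^ 1 < 2 ^ k := pow_lt_pow_right₀ (by norm_num) (by omega)
        simpa using h1
      have hmod : PySem.Int.mod ((2:Int) ^ k) 2 = 0 := by
        rw [PySem.Int.mod_eq_emod_of_pos (by omega : (0:Int) < 2), hs2]
        omega
      have hfd2 : PySem.Int.floordiv d 2 = d / 2 :=
        PySem.Int.floordiv_eq_ediv_of_pos (by omega : (0:Int) < 2)
      rw [interpolate_drift]
      dsimp only
      rw [dif_neg (show ¬ (round_up_power_of_two ((2:Int) ^ k) > (2:Int) ^ k) from by rw [hru]; omega),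
          if_pos (bitCount_two_pow k),
          if_neg (show ¬ ((2:Int) ^ k = 2) from by omega),
          dif_pos hgt2, if_pos hmod,
          dif_neg (show ¬ (d < 0) from by omega)]
      by_cases h5 : PySem.Int.floordiv d ((2:Int) ^ k - 1) > 0
      · -- shift branch
        rw [dif_pos h5]
        have hpos1 : (0:Int) < 2 ^ k - 1 := by omega
        have hge : 1 * ((2:Int) ^ k - 1) ≤ d := (PySem.Int.le_floordiv_iff_mul_le hpos1).mp h5
        have hr0 : 0 ≤ PySem.Int.mod d ((2:Int) ^ k - 1) := PySem.Int.mod_nonneg d hpos1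
        have hrlt : PySem.Int.mod d ((2:Int) ^ k - 1) < 2 ^ k - 1 := PySem.Int.mod_lt d hpos1
        rw [ih (2 ^ k + (PySem.Int.mod d ((2:Int) ^ k - 1)).toNat) (by omega) k
              (PySem.Int.mod d ((2:Int) ^ k - 1)) rfl hk hr0]
        rw [enum_map_range]
        refine (List.map_congr_left fun i hi => ?_).symm
        rw [altGo_shift (i : Int) d ((2:Int) ^ k) 0 hgt2 (by omega)]
      · -- halving branch
        rw [dif_neg h5]
        have hlt : d < 2 ^ k - 1 := by
          by_contra hc
          exact h5 ((PySem.Int.le_floordiv_iff_mul_le (by omega)).mpr (by omega : 1 * ((2:Int) ^ k - 1) ≤ d))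
        rw [if_pos (PySem.Int.floordiv_mul_add_mod d 2), fd_two_pow k (by omega)]
        have hrec2 := ih (2 ^ (k-1) + (PySem.Int.floordiv d 2).toNat)
          (by have := Nat.pow_lt_pow_right (a := 2) (by omega) (show k - 1 < k by omega)
              rw [hfd2] at *; omega)
          (k-1) (PySem.Int.floordiv d 2) rfl (by omega) (by rw [hfd2]; omega)
        rw [hrec2]
        have hone : (1:ℕ) ≤ 2 ^ (k-1) := hpn
        have hMs : (2:ℕ) ^ (k-1) = (2 ^ (k-1) - 1) + 1 := by omega
        have hcastM : ((2 ^ (k-1) - 1 : ℕ) : Int) = (2:Int) ^ (k-1) - 1 := by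
          push_cast [hone]
          ring
        have hlast : PySem.List.pyGet?
            ((List.range (2 ^ (k-1))).map
              (fun (i : ℕ) => altGo (i : Int) (PySem.Int.floordiv d 2) ((2:Int) ^ (k-1)) 0)) (-1)
            = some (PySem.Int.floordiv d 2) := by
          rw [hMs, List.range_succ, List.map_append, List.map_singleton,
              PySem.List.pyGet?_neg_one_append_singleton]
          rw [hcastM, altGo_last (k-1) (by omega) _ (by rw [hfd2]; omega)]
        rw [hlast]
        dsimp only
        -- B side: split the range in half
        rw [show (2:ℕ) ^ k = 2 ^ (k-1) + 2 ^ (k-1) from by omega, List.range_add,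
            List.map_append, List.map_map]
        congr 1
        · refine (List.map_congr_left fun i hi => ?_).symm
          have hi' : (i : Int) < 2 ^ (k-1) := by exact_mod_cast List.mem_range.mp hi
          conv_lhs => rw [altGo]
          rw [dif_pos hgt2]
          dsimp only
          rw [if_neg (show ¬ ((2:Int) ^ k - 1 ≤ d) from by omega),
              if_neg (show ¬ ((2:Int) ^ k - 1 ≤ d) from by omega),
              fd_two_pow k (by omega),
              if_neg (show ¬ ((2:Int) ^ (k-1) ≤ (i : Int)) from by omega),
              if_neg (show ¬ ((2:Int) ^ (k-1) ≤ (i : Int)) from by omega)]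
        · rw [List.map_map]
          refine (List.map_congr_left fun i hi => ?_).symm
          have hi' : (i : Int) < 2 ^ (k-1) := by exact_mod_cast List.mem_range.mp hi
          have hcast2 : ((2 ^ (k-1) + i : ℕ) : Int) = (2:Int) ^ (k-1) + (i : Int) := by push_cast; ring
          simp only [Function.comp]
          conv_lhs => rw [altGo]
          rw [dif_pos hgt2]
          dsimp only
          rw [hcast2,
              if_neg (show ¬ ((2:Int) ^ k - 1 ≤ d) from by omega),
              if_neg (show ¬ ((2:Int) ^ k - 1 ≤ d) from by omega),
              fd_two_pow k (by omega),
              if_pos (show (2:Int) ^ (k-1) ≤ (2:Int) ^ (k-1) + (i : Int) from by omega),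
              if_pos (show (2:Int) ^ (k-1) ≤ (2:Int) ^ (k-1) + (i : Int) from by omega)]
          rw [show (2:Int) ^ (k-1) + (i : Int) - 2 ^ (k-1) = (i : Int) from by ring]
          rw [altGo_acc' ((i : Int)) (PySem.Int.floordiv d 2) ((2:Int) ^ (k-1))
                (0 + PySem.Int.floordiv d 2 + PySem.Int.mod d 2)]
          ring

-- both signs
lemma main_all (k : ℕ) (hk : 1 ≤ k) (d : Int) :
    interpolate_drift d ((2:Int) ^ k) =
      (List.range (2 ^ k)).map
        (fun (i : ℕ) => (if d < 0 then (-1:Int) else 1) * altGo (i : Int) |d| ((2:Int) ^ k) 0) := by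
  by_cases hd : 0 ≤ d
  · rw [main_nonneg (2 ^ k + d.toNat) k d rfl hk hd]
    refine List.map_congr_left fun i hi => ?_
    rw [if_neg (by omega), abs_of_nonneg hd]
    ring
  · push Not at hd
    by_cases hk1 : k = 1
    · subst hk1
      norm_num
      rw [main_base]
      norm_num [List.range_succ, altGo_two, abs_of_neg hd]
      omega
    · have hk2 : 2 ≤ k := by omega
      have hru : round_up_power_of_two ((2:Int) ^ k) = 2 ^ k := ru_two_pow k
      have hs2 : (2:Int) ^ k = 2 ^ (k-1) * 2 := by rw [← pow_succ]; congr 1; omega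
      have hp : (0:Int) < 2 ^ (k-1) := by positivity
      have hgt2 : (2:Int) < 2 ^ k := by
        have h1 : (2:Int) ^ 1 < 2 ^ k := pow_lt_pow_right₀ (by norm_num) (by omega)
        simpa using h1
      have hmod : PySem.Int.mod ((2:Int) ^ k) 2 = 0 := by
        rw [PySem.Int.mod_eq_emod_of_pos (by omega : (0:Int) < 2), hs2]
        omega
      rw [interpolate_drift]
      dsimp only
      rw [dif_neg (show ¬ (round_up_power_of_two ((2:Int) ^ k) > (2:Int) ^ k) from by rw [hru]; omega),
          if_pos (bitCount_two_pow k),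
          if_neg (show ¬ ((2:Int) ^ k = 2) from by omega),
          dif_pos hgt2, if_pos hmod, dif_pos hd]
      rw [main_nonneg (2 ^ k + (-d).toNat) k (-d) rfl hk (by omega)]
      rw [List.map_map]
      refine List.map_congr_left fun i hi => ?_
      simp only [Function.comp]
      rw [if_pos hd, abs_of_neg hd]
      ring

lemma altRu_eq : ∀ (μ : ℕ) (t m : Int), (t - m).toNat = μ → altRu t m = ruGo t m := by
  intro μ
  induction μ using Nat.strong_induction_on with
  | _ μ ih =>
    intro t m hμ
    rw [altRu, ruGo]
    split
    · rename_i h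
      exact ih (t - 2*m).toNat (by omega) t (2*m) rfl
    · rfl

-- ===== VERDICT (by name: the statement is the Claim_ definition above) =====
theorem interpolate_drift_spec : Claim_equal_interpolate_drift := by
  intro d t _ hpre
  unfold Pre_interpolate_drift at hpre
  unfold Spec_interpolate_drift interpolate_drift_alt
  dsimp only
  have hma : altRu t 1 = round_up_power_of_two t := altRu_eq (t - 1).toNat t 1 rfl
  obtain ⟨j, hj⟩ := ru_pow t
  have hge := ru_ge t
  have hcj : (((2:ℕ) ^ j : ℕ) : Int) = (2:Int) ^ j := by push_cast; ring
  have hcj' : ((2:Int) ^ j).toNat = 2 ^ j := by rw [← hcj]; exact Int.toNat_natCast _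
  have hj1 : 1 ≤ j := by
    by_contra hc
    have hj0 : j = 0 := by omega
    rw [hj0] at hj
    simp at hj
    omega
  rw [hma, hj]
  by_cases hgt : round_up_power_of_two t > t
  · rw [interpolate_drift]
    dsimp only
    rw [dif_pos hgt, hj, main_all j hj1 d,
        PySem.List.slice_to _ (by omega : (0:Int) ≤ t),
        ← List.map_take, List.take_range]
    congr 1
    have hle : t.toNat ≤ 2 ^ j := by
      rw [hj] at hge
      omega
    rw [Nat.min_eq_left hle]
  · have ht : t = (2:Int) ^ j := by omega
    rw [ht, main_all j hj1 d, hcj']
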